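-- pv_equiv track=rewrite | github.com/lake-health/lakecalc-ai | parse_iol_xml.py | determine_iol_type
-- ===== SOURCE A (Python) =====
-- def determine_iol_type(name: str, lens) -> str:
--     """Determine IOL type from name and specifications."""
--     name_lower = name.lower()
--
--     # Toric
--     if 'toric' in name_lower:
--         return 'toric'
--
--     # Multifocal/Trifocal
--     if any(term in name_lower for term in ['multifocal', 'trifocal', 'bifocal']):
--         return 'multifocal'
--
--     # Extended Depth of Focus
--     if any(term in name_lower for term in ['edof', 'extended', 'depth', 'focus']):
--         return 'extended_depth_of_focus'
--
--     # Accommodating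
--     if any(term in name_lower for term in ['accommodating', 'crystalens']):
--         return 'accommodating'
--
--     # Default to monofocal
--     return 'monofocal'
-- ===== SOURCE B (Python) =====
-- _PRIORITY = ['toric', 'multifocal', 'extended_depth_of_focus', 'accommodating', 'monofocal']
--
-- _TERM_RANK = {
--     'toric': 0,
--     'multifocal': 1, 'trifocal': 1, 'bifocal': 1,
--     'edof': 2, 'extended': 2, 'depth': 2, 'focus': 2,
--     'accommodating': 3, 'crystalens': 3,
-- }
--
--
-- def determine_iol_type(name: str, lens) -> str:
--     """Determine IOL type from name and specifications."""
--     name_lower = name.lower()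
--     best = len(_PRIORITY) - 1  # monofocal, the default (lowest priority)
--     for term, rank in _TERM_RANK.items():
--         if term in name_lower and rank < best:
--             best = rank
--     return _PRIORITY[best]
-- ===== Notes on version B (the rewrite author's own statement) =====
-- stated objective: alternative
-- what changed: Instead of an ordered if-chain with early return, B scans a flat term-to-priority-rank map with no early exit, keeps the minimum rank among all matching terms in an accumulator, and indexes a priority array with that minimum at the end.
import Mathlib
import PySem

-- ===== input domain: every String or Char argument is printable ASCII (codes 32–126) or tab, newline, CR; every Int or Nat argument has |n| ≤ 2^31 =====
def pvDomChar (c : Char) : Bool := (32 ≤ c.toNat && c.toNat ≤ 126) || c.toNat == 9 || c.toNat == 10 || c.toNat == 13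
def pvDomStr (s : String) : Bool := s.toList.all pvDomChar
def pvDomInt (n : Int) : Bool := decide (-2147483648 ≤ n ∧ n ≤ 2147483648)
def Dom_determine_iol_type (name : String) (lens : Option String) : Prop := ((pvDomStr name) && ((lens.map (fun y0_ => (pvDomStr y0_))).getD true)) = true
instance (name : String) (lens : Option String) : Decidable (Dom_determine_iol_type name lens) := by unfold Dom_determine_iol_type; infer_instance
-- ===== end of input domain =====

-- B replaces A's early-return if-chain by an exhaustive scan of a flat term→rank map keeping the minimum matching rank in an accumulator, then indexes a priority array (objective: alternative).
-- ===== PORT A =====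
def determine_iol_type (name : String) (lens : Option String) : String :=
  let name_lower := PySem.Str.lower name
  if PySem.Str.isIn "toric" name_lower then "toric"
  else if ["multifocal", "trifocal", "bifocal"].any (fun term => PySem.Str.isIn term name_lower) then "multifocal"
  else if ["edof", "extended", "depth", "focus"].any (fun term => PySem.Str.isIn term name_lower) then "extended_depth_of_focus"
  else if ["accommodating", "crystalens"].any (fun term => PySem.Str.isIn term name_lower) then "accommodating"
  else "monofocal"

-- ===== PORT B =====
def pvPriority : List String :=
  ["toric", "multifocal", "extended_depth_of_focus", "accommodating", "monofocal"]

def pvTermRank : List (String × Nat) :=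
  [("toric", 0),
   ("multifocal", 1), ("trifocal", 1), ("bifocal", 1),
   ("edof", 2), ("extended", 2), ("depth", 2), ("focus", 2),
   ("accommodating", 3), ("crystalens", 3)]

def determine_iol_type_alt (name : String) (lens : Option String) : String :=
  let name_lower := PySem.Str.lower name
  let best := pvTermRank.foldl
    (fun best tr => if PySem.Str.isIn tr.1 name_lower && decide (tr.2 < best) then tr.2 else best)
    (pvPriority.length - 1)
  -- _PRIORITY[best]: best < pvPriority.length always holds, so getD is exact for Python's indexing here
  pvPriority.getD best ""

-- ===== PRECONDITION & SPEC =====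
def Spec_determine_iol_type (name : String) (lens : Option String) (out : String) : Prop := out = determine_iol_type_alt name lens
instance (name : String) (lens : Option String) (out : String) : Decidable (Spec_determine_iol_type name lens out) := by unfold Spec_determine_iol_type; infer_instance

-- ===== CLAIM (what is proved, stated in full; the proofs are below) =====
def Claim_equal_determine_iol_type : Prop := ∀ (name : String) (lens : Option String), Dom_determine_iol_type name lens → Spec_determine_iol_type name lens (determine_iol_type name lens)

-- ===== LEMMAS AND PROOFS =====
-- Both sides as a function of the ten substring-test booleans: A's if-chain equals B's min-rank fold.
theorem pv_key (b1 b2 b3 b4 b5 b6 b7 b8 b9 b10 : Bool) :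
  (if b1 then "toric"
   else if b2 || (b3 || (b4 || false)) then "multifocal"
   else if b5 || (b6 || (b7 || (b8 || false))) then "extended_depth_of_focus"
   else if b9 || (b10 || false) then "accommodating"
   else "monofocal")
  = pvPriority.getD
      (([(b1,0),(b2,1),(b3,1),(b4,1),(b5,2),(b6,2),(b7,2),(b8,2),(b9,3),(b10,3)] : List (Bool × Nat)).foldl
        (fun best tr => if tr.1 && decide (tr.2 < best) then tr.2 else best)
        (pvPriority.length - 1)) "" := by
  revert b1 b2 b3 b4 b5 b6 b7 b8 b9 b10
  decide

-- B's fold over (term, rank) pairs equals the fold over the precomputed (test-result, rank) pairs.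
theorem foldl_pairs (nl : String) (l : List (String × Nat)) (init : Nat) :
  l.foldl (fun best tr => if PySem.Str.isIn tr.1 nl && decide (tr.2 < best) then tr.2 else best) init
  = (l.map (fun tr => (PySem.Str.isIn tr.1 nl, tr.2))).foldl (fun best tr => if tr.1 && decide (tr.2 < best) then tr.2 else best) init := by
  induction l generalizing init with
  | nil => rfl
  | cons hd tl ih => simp only [List.foldl, List.map]; rw [ih]

-- ===== VERDICT (by name: the statement is the Claim_ definition above) =====
theorem determine_iol_type_spec : Claim_equal_determine_iol_type := by
  intro name lens _
  unfold Spec_determine_iol_type determine_iol_type determine_iol_type_alt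
  simp only [List.any_cons, List.any_nil]
  rw [foldl_pairs]
  simp only [pvTermRank, List.map]
  exact pv_key _ _ _ _ _ _ _ _ _ _
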